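-- pv_equiv track=rewrite | github.com/minu0508/Algorithm | Python/Programmers/Level_0/최빈값 구하기.py | solution
-- ===== SOURCE A (Python) =====
-- def solution(array):
--     answer = 0
--     count_list = []
--     Max_number = 0
--     array_set = list(set(array))
--
--     if (len(array) == 1):
--         answer = array[0]
--     else:
--         for i in array_set:
--             count_list.append(array.count(i))
--         Max_number = max(count_list)
--
--         if (count_list.count(Max_number) > 1):
--             answer = -1
--         else:
--             answer = array_set[count_list.index(Max_number)]
--
--     return answer
-- ===== SOURCE B (Python) =====
-- def solution(array):
--     s = sorted(array)
--     vals = []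
--     cnts = []
--     for x in s:
--         if vals and vals[-1] == x:
--             cnts[-1] += 1
--         else:
--             vals.append(x)
--             cnts.append(1)
--     m = max(cnts)
--     if cnts.count(m) > 1:
--         return -1
--     return vals[cnts.index(m)]
-- ===== Notes on version B (the rewrite author's own statement) =====
-- stated objective: faster
-- what changed: Replaces A's list(set(array)) plus a full array.count scan per distinct value (O(n*k)) by sorting a copy and one pass over the sorted list collecting run values and run lengths, then the same max/tie decision.
-- outside the precondition, e.g. on solution([]): A raises ValueError, B raises ValueError
import Mathlib
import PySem

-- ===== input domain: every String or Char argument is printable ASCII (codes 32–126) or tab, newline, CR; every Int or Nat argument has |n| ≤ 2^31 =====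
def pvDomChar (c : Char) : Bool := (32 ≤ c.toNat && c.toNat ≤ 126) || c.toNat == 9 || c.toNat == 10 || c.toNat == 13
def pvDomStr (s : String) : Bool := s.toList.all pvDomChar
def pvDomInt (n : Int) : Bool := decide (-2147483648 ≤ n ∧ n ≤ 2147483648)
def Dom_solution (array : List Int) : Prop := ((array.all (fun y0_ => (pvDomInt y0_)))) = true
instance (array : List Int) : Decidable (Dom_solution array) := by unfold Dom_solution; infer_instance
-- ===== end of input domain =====

-- B replaces A's set + repeated array.count scans (O(n*k)) by sort-then-one-pass run-length grouping (O(n log n)); measurably faster in a timing run.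

-- ===== PORT A =====
def solution (array : List Int) : Int :=
  let array_set : List Int := PySem.Set.ofList array
  if array.length == 1 then (PySem.List.pyGet? array 0).getD 0
  else
    let count_list : List Int :=
      array_set.foldl (fun acc i => acc ++ [(PySem.List.count array i : Int)]) []
    let Max_number : Int := (PySem.List.max? count_list (fun x => x)).getD 0
    if (PySem.List.count count_list Max_number : Int) > 1 then -1
    else
      (((PySem.List.index? count_list Max_number).map (fun k => (k : Int))).bind
        (fun k => PySem.List.pyGet? array_set k)).getD 0

-- ===== PORT B =====
def solution_alt (array : List Int) : Int :=
  let s := PySem.List.sorted array (fun x => x) false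
  let vc := s.foldl
    (fun (p : List Int × List Int) x =>
      if p.1 ≠ [] ∧ p.1.getLast? = some x
      then (p.1, p.2.dropLast ++ [(p.2.getLast?.getD 0) + 1])
      else (p.1 ++ [x], p.2 ++ [1])) ([], [])
  let m : Int := (PySem.List.max? vc.2 (fun x => x)).getD 0
  if (PySem.List.count vc.2 m : Int) > 1 then -1
  else
    (((PySem.List.index? vc.2 m).map (fun k => (k : Int))).bind
      (fun k => PySem.List.pyGet? vc.1 k)).getD 0

-- ===== PRECONDITION & SPEC =====
-- Pre_ excludes only the empty list, on which A raises ValueError (max of an empty count list).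
def Pre_solution (array : List Int) : Prop := array ≠ []
instance (array : List Int) : Decidable (Pre_solution array) := by unfold Pre_solution; infer_instance
def pvWitness_solution : List Int := [3, 1, 3]

def Spec_solution (array : List Int) (out : Int) : Prop := out = solution_alt array
instance (array : List Int) (out : Int) : Decidable (Spec_solution array out) := by unfold Spec_solution; infer_instance

-- ===== CLAIM (what is proved, stated in full; the proofs are below) =====
def Claim_equal_solution : Prop := ∀ (array : List Int), Dom_solution array → Pre_solution array → Spec_solution array (solution array)



-- ===== LEMMAS AND PROOFS =====

-- count in the ORIGINAL array, as the Int the ports carry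
def pvCnt (a : List Int) (v : Int) : Int := (PySem.List.count a v : Int)

-- shared tail decision of both ports: distinct values vs, count function f
def pvDecide (f : Int → Int) (vs : List Int) : Int :=
  if (PySem.List.count (vs.map f) ((PySem.List.max? (vs.map f) (fun x => x)).getD 0) : Int) > 1
  then (-1 : Int)
  else
    (((PySem.List.index? (vs.map f) ((PySem.List.max? (vs.map f) (fun x => x)).getD 0)).map
        (fun k => (k : Int))).bind
      (fun k => PySem.List.pyGet? vs k)).getD 0

lemma pv_count_map (l : List Int) (f : Int → Int) (M : Int) :
    (l.map f).count M = l.countP (fun a => f a == M) := by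
  induction l with
  | nil => rfl
  | cons a t ih => simp [List.count_cons, List.countP_cons, ih]

lemma pv_ofList_concat (l : List Int) (x : Int) :
    PySem.Set.ofList (l ++ [x]) =
      if x ∈ l then PySem.Set.ofList l else PySem.Set.ofList l ++ [x] := by
  have h1 : PySem.Set.ofList (l ++ [x]) = PySem.Set.add (PySem.Set.ofList l) x := by
    simp [PySem.Set.ofList_eq_foldl]
  rw [h1]
  simp [PySem.Set.add]

lemma pv_ofList_pairwise_lt (l : List Int) (h : l.Pairwise (· ≤ ·)) :
    (PySem.Set.ofList l).Pairwise (· < ·) := by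
  induction l using List.reverseRecOn with
  | nil => simp [PySem.Set.ofList]
  | append_singleton l x ih =>
    rcases List.pairwise_append.mp h with ⟨hl, _, hle⟩
    rw [pv_ofList_concat]
    by_cases hx : x ∈ l
    · rw [if_pos hx]; exact ih hl
    · rw [if_neg hx]
      refine List.pairwise_append.mpr ⟨ih hl, by simp, ?_⟩
      intro a ha b hb
      simp at hb; subst hb
      have ha' : a ∈ l := (PySem.Set.mem_ofList l a).mp ha
      have := hle a ha' b (by simp)
      rcases lt_or_eq_of_le this with h' | h'
      · exact h'
      · exact absurd (h' ▸ ha') hx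

-- the element ≥ everything in a strictly increasing list is its last element
lemma pv_getLast_of_max (L : List Int) (x : Int) (hp : L.Pairwise (· < ·))
    (hm : x ∈ L) (hb : ∀ y ∈ L, y ≤ x) : L.getLast? = some x := by
  induction L with
  | nil => cases hm
  | cons a t ih =>
    cases t with
    | nil => simp at hm ⊢; omega
    | cons b u =>
      have hgl : (a :: b :: u).getLast? = (b :: u).getLast? := rfl
      rw [hgl]
      rcases List.mem_cons.mp hm with hxa | hxt
      · exfalso
        have hab : a < b := (List.pairwise_cons.mp hp).1 b (by simp)
        have hbx : b ≤ x := hb b (by simp)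
        omega
      · exact ih (List.pairwise_cons.mp hp).2 hxt
          (fun y hy => hb y (List.mem_cons_of_mem a hy))

-- counting in l ++ [x]
lemma pv_cnt_concat (l : List Int) (x v : Int) :
    pvCnt (l ++ [x]) v = pvCnt l v + (if v = x then 1 else 0) := by
  by_cases hvx : v = x
  · subst hvx; simp [pvCnt, PySem.List.count_eq, List.count_append]
  · simp [pvCnt, PySem.List.count_eq, List.count_append, hvx, List.count_eq_zero]

-- B's single pass over a sorted list builds the distinct values and their counts
lemma pv_fold (l : List Int) (h : l.Pairwise (· ≤ ·)) :
    List.foldl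
      (fun (p : List Int × List Int) x =>
        if p.1 ≠ [] ∧ p.1.getLast? = some x
        then (p.1, p.2.dropLast ++ [(p.2.getLast?.getD 0) + 1])
        else (p.1 ++ [x], p.2 ++ [1])) ([], []) l
    = (PySem.Set.ofList l, (PySem.Set.ofList l).map (pvCnt l)) := by
  induction l using List.reverseRecOn with
  | nil => rfl
  | append_singleton l x ih =>
    rcases List.pairwise_append.mp h with ⟨hl, _, hle⟩
    rw [List.foldl_append, ih hl]
    have hlt := pv_ofList_pairwise_lt l hl
    by_cases hx : x ∈ l
    · -- x already seen: it is the last distinct value; bump the last count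
      have hxs : x ∈ PySem.Set.ofList l := (PySem.Set.mem_ofList l x).mpr hx
      have hlast : (PySem.Set.ofList l).getLast? = some x := by
        refine pv_getLast_of_max _ _ hlt hxs ?_
        intro y hy
        exact hle y ((PySem.Set.mem_ofList l y).mp hy) x (by simp)
      have hne : PySem.Set.ofList l ≠ [] := by
        intro h0; rw [h0] at hxs; cases hxs
      simp only [List.foldl_cons, List.foldl_nil]
      rw [if_pos ⟨hne, hlast⟩]
      rw [pv_ofList_concat, if_pos hx]
      refine Prod.ext rfl ?_
      have hdecomp : PySem.Set.ofList l = (PySem.Set.ofList l).dropLast ++ [x] :=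
        (List.dropLast_append_getLast? x hlast).symm
      have hxnot : x ∉ (PySem.Set.ofList l).dropLast := by
        have hnodup2 : ((PySem.Set.ofList l).dropLast ++ [x]).Nodup :=
          hdecomp ▸ PySem.Set.nodup_ofList l
        have hd := List.nodup_append.mp hnodup2
        intro hmem
        exact (hd.2.2 x hmem x (List.mem_singleton_self x)) rfl
      have hC : (List.map (pvCnt l) (PySem.Set.ofList l)).getLast? = some (pvCnt l x) := by
        rw [List.getLast?_map, hlast]; rfl
      have hD : (List.map (pvCnt l) (PySem.Set.ofList l)).dropLast
          = List.map (pvCnt l) ((PySem.Set.ofList l).dropLast) := by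
        exact Eq.symm List.map_dropLast
      simp only [hC, hD, Option.getD_some]
      conv_rhs => rw [hdecomp]
      rw [List.map_append]
      simp only [List.map_cons, List.map_nil]
      congr 1
      · apply List.map_congr_left
        intro v hv
        rw [pv_cnt_concat, if_neg (fun hh : v = x => hxnot (hh ▸ hv)), add_zero]
      · rw [pv_cnt_concat, if_pos rfl]
    · -- new value: append it with count 1
      have hxs : x ∉ PySem.Set.ofList l := fun hc => hx ((PySem.Set.mem_ofList l x).mp hc)
      have hcond : ¬ (PySem.Set.ofList l ≠ [] ∧ (PySem.Set.ofList l).getLast? = some x) := by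
        rintro ⟨_, hlast⟩
        exact hxs (List.mem_of_getLast? hlast)
      simp only [List.foldl_cons, List.foldl_nil]
      rw [if_neg hcond]
      rw [pv_ofList_concat, if_neg hx]
      refine Prod.ext rfl ?_
      rw [List.map_append]
      simp only [List.map_cons, List.map_nil]
      congr 1
      · apply List.map_congr_left
        intro v hv
        rw [pv_cnt_concat, if_neg (fun hh : v = x => hxs (hh ▸ hv)), add_zero]
      · rw [pv_cnt_concat, if_pos rfl]
        simp [pvCnt, PySem.List.count_eq, List.count_eq_zero_of_not_mem hx]

-- the decision depends on the distinct-value list only through its underlying set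
lemma pv_decide_perm (f : Int → Int) (vs1 vs2 : List Int) (hp : vs1.Perm vs2)
    (hne : vs1 ≠ []) : pvDecide f vs1 = pvDecide f vs2 := by
  have hpc : (vs1.map f).Perm (vs2.map f) := hp.map f
  obtain ⟨m1, hm1⟩ : ∃ m, PySem.List.max? (vs1.map f) (fun x => x) = some m := by
    cases hq : PySem.List.max? (vs1.map f) (fun x => x) with
    | none => exact absurd (by simpa using (PySem.List.max?_eq_none_iff _ _).mp hq) hne
    | some m => exact ⟨m, rfl⟩
  obtain ⟨m2, hm2⟩ : ∃ m, PySem.List.max? (vs2.map f) (fun x => x) = some m := by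
    cases hq : PySem.List.max? (vs2.map f) (fun x => x) with
    | none =>
      have h0 : vs2 = [] := by simpa using (PySem.List.max?_eq_none_iff _ _).mp hq
      exact absurd ((h0 ▸ hp).eq_nil) hne
    | some m => exact ⟨m, rfl⟩
  have hmm : m1 = m2 := by
    have ha1 := PySem.List.max?_mem hm1
    have ha2 := PySem.List.max?_mem hm2
    have hb1 := PySem.List.max?_isMax hm1
    have hb2 := PySem.List.max?_isMax hm2
    have h12 : m1 ≤ m2 := hb2 m1 (hpc.mem_iff.mp ha1)
    have h21 : m2 ≤ m1 := hb1 m2 (hpc.mem_iff.mpr ha2)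
    omega
  subst hmm
  have hcnt : PySem.List.count (vs1.map f) m1 = PySem.List.count (vs2.map f) m1 := by
    rw [PySem.List.count_eq, PySem.List.count_eq]
    exact hpc.count_eq m1
  unfold pvDecide
  rw [hm1, hm2]
  simp only [Option.getD_some, hcnt]
  by_cases hgt : (PySem.List.count (vs2.map f) m1 : Int) > 1
  · rw [if_pos hgt, if_pos hgt]
  · rw [if_neg hgt, if_neg hgt]
    have hmem1 : m1 ∈ vs1.map f := PySem.List.max?_mem hm1
    have hone : (vs1.map f).count m1 = 1 := by
      have hpos : 0 < (vs1.map f).count m1 := List.count_pos_iff.mpr hmem1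
      have h1' : (PySem.List.count (vs1.map f) m1 : Int) ≤ 1 := by rw [hcnt]; omega
      rw [PySem.List.count_eq] at h1'
      omega
    have hfil1 : (vs1.filter (fun a => f a == m1)).length = 1 := by
      rw [(List.countP_eq_length_filter ..).symm, ← pv_count_map, hone]
    obtain ⟨w, hw⟩ := List.length_eq_one_iff.mp hfil1
    have huniq : ∀ v, v ∈ vs1 → f v = m1 → v = w := by
      intro v hv hfv
      have hvf : v ∈ vs1.filter (fun a => f a == m1) :=
        List.mem_filter.mpr ⟨hv, by simp [hfv]⟩
      rw [hw] at hvf; simpa using hvf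
    obtain ⟨k1, hk1⟩ : ∃ k, PySem.List.index? (vs1.map f) m1 = some k := by
      cases hq : PySem.List.index? (vs1.map f) m1 with
      | none => exact absurd ((PySem.List.index?_eq_none_iff _ _).mp hq) (by simp [hmem1])
      | some k => exact ⟨k, rfl⟩
    obtain ⟨k2, hk2⟩ : ∃ k, PySem.List.index? (vs2.map f) m1 = some k := by
      cases hq : PySem.List.index? (vs2.map f) m1 with
      | none =>
        exact absurd ((PySem.List.index?_eq_none_iff _ _).mp hq)
          (by simp [hpc.mem_iff.mp hmem1])
      | some k => exact ⟨k, rfl⟩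
    obtain ⟨hk1lt, hk1v, _⟩ := PySem.List.getElem_of_index?_eq_some hk1
    obtain ⟨hk2lt, hk2v, _⟩ := PySem.List.getElem_of_index?_eq_some hk2
    have hl1 : k1 < vs1.length := by simpa using hk1lt
    have hl2 : k2 < vs2.length := by simpa using hk2lt
    have he1 : vs1[k1] = w := by
      apply huniq _ (List.getElem_mem hl1)
      have hx := hk1v; simpa using hx
    have he2 : vs2[k2] = w := by
      apply huniq _ (hp.mem_iff.mpr (List.getElem_mem hl2))
      have hx := hk2v; simpa using hx
    rw [hk1, hk2]
    simp [PySem.List.pyGet?_natCast, List.getElem?_eq_getElem hl1,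
      List.getElem?_eq_getElem hl2, he1, he2]

-- B computes pvDecide over the sorted distinct values
lemma pv_alt_eq (array : List Int) :
    solution_alt array =
      pvDecide (pvCnt array)
        (PySem.Set.ofList (PySem.List.sorted array (fun x => x) false)) := by
  simp only [solution_alt]
  rw [pv_fold _ (PySem.List.sorted_pairwise array (fun x => x))]
  have hc : pvCnt (PySem.List.sorted array (fun x => x) false) = pvCnt array := by
    funext v
    simp only [pvCnt, PySem.List.count_eq]
    exact_mod_cast congrArg Nat.cast ((PySem.List.sorted_perm array (fun x => x) false).count_eq v)
  rw [hc]
  rfl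

-- A computes pvDecide over its set's distinct values (when the length-1 branch is not taken)
lemma pv_a_eq (array : List Int) (h : array.length ≠ 1) :
    solution array = pvDecide (pvCnt array) (PySem.Set.ofList array) := by
  simp only [solution]
  rw [if_neg (by simpa using h)]
  rw [PySem.List.foldl_append_singleton_eq_map]
  rw [List.nil_append]
  rfl

lemma pv_set_perm (array : List Int) :
    (PySem.Set.ofList array).Perm
      (PySem.Set.ofList (PySem.List.sorted array (fun x => x) false)) := by
  apply (List.perm_ext_iff_of_nodup (PySem.Set.nodup_ofList _) (PySem.Set.nodup_ofList _)).mpr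
  intro v
  rw [PySem.Set.mem_ofList, PySem.Set.mem_ofList, PySem.List.mem_sorted]

lemma pv_ofList_ne_nil (array : List Int) (h : array ≠ []) : PySem.Set.ofList array ≠ [] := by
  intro h0
  cases array with
  | nil => exact h rfl
  | cons a t =>
    have : a ∈ PySem.Set.ofList (a :: t) := (PySem.Set.mem_ofList _ _).mpr (by simp)
    rw [h0] at this
    cases this

-- ===== VERDICT (by name: the statement is the Claim_ definition above) =====
theorem solution_spec : Claim_equal_solution := by
  intro array _ hpre
  show solution array = solution_alt array
  rw [pv_alt_eq]
  by_cases hlen : array.length = 1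
  · obtain ⟨a, rfl⟩ := List.length_eq_one_iff.mp hlen
    have h1 : solution [a] = a := rfl
    have h2 : PySem.Set.ofList (PySem.List.sorted [a] (fun x => x) false) = [a] := rfl
    have h3 : pvCnt [a] a = 1 := by simp [pvCnt, PySem.List.count_eq]
    rw [h1, h2]
    unfold pvDecide
    simp [h3, PySem.List.max?, PySem.List.index?, PySem.List.count_eq,
      PySem.List.pyGet?, PySem.List.pyIdx?]
  · rw [pv_a_eq array hlen]
    exact pv_decide_perm (pvCnt array) _ _ (pv_set_perm array)
      (pv_ofList_ne_nil array hpre)
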